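-- pv_equiv track=rewrite | github.com/inyong37/Study | v. Algorithm/C. Codility/a. Lessons/Lesson08_02_EquiLeader.py | solution
-- ===== SOURCE A (Python) =====
-- def solution(A):
--     result = 0
--     for i in range(0, len(A)-1):
--         left = A[0:i+1]
--         right = A[i+1:]
--
--         # get left leader
--         l = ''
--         cnt = 0
--         for val in left:
--             if l == '':
--                 l = val
--                 cnt = 1
--             else:
--                 if val != l:
--                     cnt -= 1
--                     if cnt == 0:
--                         l = ''
--                 else:
--                     cnt += 1
--
--         # get right leader
--         r = ''
--         cnt = 0
--         for val in right:
--             if r == '':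
--                 r = val
--                 cnt = 1
--             else:
--                 if val != r:
--                     cnt -= 1
--                     if cnt == 0:
--                         r = ''
--                 else:
--                     cnt += 1
--
--
--         if l == r:
--             result += 1
--         else:
--             pass
--
--     return result
-- ===== SOURCE B (Python) =====
-- def _bm(seq):
--     # Boyer-Moore candidate of seq, '' if knocked out / empty
--     cand = ''
--     cnt = 0
--     for v in seq:
--         if cand == '':
--             cand, cnt = v, 1
--         elif v == cand:
--             cnt += 1
--         else:
--             cnt -= 1
--             if cnt == 0:
--                 cand = ''
--     return cand
--
-- def solution(A):
--     n = len(A)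
--     # prefix candidates in one incremental pass: L[i] = BM candidate of A[0:i+1]
--     L = []
--     cand = ''
--     cnt = 0
--     for v in A:
--         if cand == '':
--             cand, cnt = v, 1
--         elif v == cand:
--             cnt += 1
--         else:
--             cnt -= 1
--             if cnt == 0:
--                 cand = ''
--         L.append(cand)
--     # suffix candidates: R[j] = BM candidate of A[j:]
--     R = [_bm(A[j:]) for j in range(n)]
--     return sum(1 for i in range(n - 1) if L[i] == R[i + 1])
-- ===== Notes on version B (the rewrite author's own statement) =====
-- stated objective: alternative
-- what changed: A recomputes both prefix and suffix Boyer-Moore candidates from scratch for every split; B builds the prefix-candidate table in one incremental pass, builds a suffix-candidate table, and then counts matches in a final comparison pass.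
import Mathlib
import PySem

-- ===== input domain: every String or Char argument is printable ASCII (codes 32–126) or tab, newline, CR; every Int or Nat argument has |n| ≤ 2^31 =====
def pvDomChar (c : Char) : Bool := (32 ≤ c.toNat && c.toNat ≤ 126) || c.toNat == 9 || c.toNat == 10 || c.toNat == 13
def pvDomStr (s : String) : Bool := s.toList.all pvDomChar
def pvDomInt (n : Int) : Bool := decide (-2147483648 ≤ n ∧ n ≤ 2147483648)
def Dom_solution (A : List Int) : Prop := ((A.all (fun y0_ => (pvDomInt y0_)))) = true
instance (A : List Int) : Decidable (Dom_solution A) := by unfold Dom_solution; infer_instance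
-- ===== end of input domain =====

-- B replaces A's per-split rescan of the prefix by one incremental Boyer-Moore pass
-- building a prefix-candidate table, plus a suffix-candidate table and a comparison pass
-- (objective: alternative decomposition; same worst-case cost).

-- ===== PORT A =====
-- A's inner Boyer-Moore loop body ('' sentinel ported as none)
def pvStepA (s : Option Int × Int) (val : Int) : Option Int × Int :=
  match s with
  | (none, _) => (some val, 1)
  | (some l, cnt) =>
    if val ≠ l then
      if cnt - 1 = 0 then (none, cnt - 1) else (some l, cnt - 1)
    else (some l, cnt + 1)

def solution (A : List Int) : Int :=
  (PySem.List.pyRange 0 ((A.length : Int) - 1) 1).foldl (fun result i =>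
    let left := PySem.List.slice A (some 0) (some (i + 1))
    let right := PySem.List.slice A (some (i + 1)) none
    let l := (left.foldl pvStepA (none, 0)).1
    let r := (right.foldl pvStepA (none, 0)).1
    if l = r then result + 1 else result) 0

-- ===== PORT B =====
-- _bm's loop body (note: 'v == cand' branch tested first, as in Source B)
def pvBmStep (s : Option Int × Int) (v : Int) : Option Int × Int :=
  match s with
  | (none, _) => (some v, 1)
  | (some cand, cnt) =>
    if v = cand then (some cand, cnt + 1)
    else if cnt - 1 = 0 then (none, cnt - 1) else (some cand, cnt - 1)

def pvBm (seq : List Int) : Option Int := (seq.foldl pvBmStep (none, 0)).1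

def solution_alt (A : List Int) : Int :=
  let n : Int := A.length
  let L : List (Option Int) :=
    (A.foldl (fun (st : List (Option Int) × (Option Int × Int)) v =>
      let s' := pvBmStep st.2 v
      (st.1 ++ [s'.1], s')) ([], (none, 0))).1
  let R : List (Option Int) :=
    (PySem.List.pyRange 0 n 1).map (fun j => pvBm (PySem.List.slice A (some j) none))
  (PySem.List.pyRange 0 (n - 1) 1).foldl (fun acc i =>
    if PySem.List.pyGet? L i = PySem.List.pyGet? R (i + 1) then acc + 1 else acc) 0

-- ===== PRECONDITION & SPEC =====
def Spec_solution (A : List Int) (out : Int) : Prop := out = solution_alt A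
instance (A : List Int) (out : Int) : Decidable (Spec_solution A out) := by unfold Spec_solution; infer_instance

-- ===== CLAIM (what is proved, stated in full; the proofs are below) =====
def Claim_equal_solution : Prop := ∀ (A : List Int), Dom_solution A → Spec_solution A (solution A)

-- ===== LEMMAS AND PROOFS =====

theorem pvStep_eq : pvStepA = pvBmStep := by
  funext s v
  rcases s with ⟨l, cnt⟩
  cases l with
  | none => rfl
  | some x =>
    by_cases h : v = x <;> simp [pvStepA, pvBmStep, h]

-- the candidates recorded by B's incremental pass
def pvScan (s : Option Int × Int) : List Int → List (Option Int)
  | [] => []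
  | v :: vs => (pvBmStep s v).1 :: pvScan (pvBmStep s v) vs

theorem pvFoldL_eq_scan (A : List Int) (acc : List (Option Int)) (s : Option Int × Int) :
    (A.foldl (fun (st : List (Option Int) × (Option Int × Int)) v =>
      let s' := pvBmStep st.2 v
      (st.1 ++ [s'.1], s')) (acc, s)).1 = acc ++ pvScan s A := by
  induction A generalizing acc s with
  | nil => simp [pvScan]
  | cons v vs ih => simp [pvScan, ih]

theorem pvScan_get (A : List Int) (s : Option Int × Int) (k : Nat) (hk : k < A.length) :
    (pvScan s A)[k]? = some ((A.take (k + 1)).foldl pvBmStep s).1 := by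
  induction A generalizing s k with
  | nil => simp at hk
  | cons v vs ih =>
    cases k with
    | zero => simp [pvScan]
    | succ m =>
      simp only [pvScan, List.getElem?_cons_succ, List.take_succ_cons, List.foldl_cons]
      exact ih (pvBmStep s v) m (by simpa using hk)

theorem solution_eq (A : List Int) : solution A = solution_alt A := by
  unfold solution solution_alt
  simp only []
  apply PySem.List.foldl_congr_mem
  intro acc i hi
  rw [PySem.List.mem_pyRange_one] at hi
  obtain ⟨h0, h1⟩ := hi
  have hi1 : (0:Int) ≤ i + 1 := by omega
  have htn : (i + 1).toNat = i.toNat + 1 := by omega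
  -- left-hand candidates
  rw [PySem.List.slice_zero_start, PySem.List.slice_to A hi1, PySem.List.slice_from A hi1]
  -- right-hand table lookups
  rw [PySem.List.pyGet?_of_nonneg _ h0, PySem.List.pyGet?_of_nonneg _ hi1]
  rw [pvFoldL_eq_scan A [] (none, 0), List.nil_append]
  have hlen : i.toNat < A.length := by omega
  rw [pvScan_get A (none, 0) i.toNat hlen]
  rw [PySem.List.getElem?_map_pyRange_zero _ A.length (i + 1).toNat (by omega)]
  have hc : (((i + 1).toNat : Int)) = i + 1 := Int.toNat_of_nonneg hi1
  rw [hc, PySem.List.slice_from A hi1, pvStep_eq, htn]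
  simp only [pvBm, Option.some.injEq]

-- ===== VERDICT (by name: the statement is the Claim_ definition above) =====
theorem solution_spec : Claim_equal_solution := by
  intro A _
  unfold Spec_solution
  exact solution_eq A
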